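-- pv_equiv track=rewrite | github.com/yuezhao238/IMAGECAPTION | metrics/metrics.py | basic_match
-- ===== SOURCE A (Python) =====
-- def basic_match(hypo_list, refer_list):
--     word_match = []
--     for i in range(len(hypo_list))[::-1]:
--         for j in range(len(refer_list))[::-1]:
--             if hypo_list[i][1] == refer_list[j][1]:
--                 word_match.append((hypo_list[i][0], refer_list[j][0]))
--                 hypo_list.pop(i)[1]
--                 refer_list.pop(j)[1]
--                 break
--     return word_match, hypo_list, refer_list
-- ===== SOURCE B (Python) =====
-- def basic_match(hypo_list, refer_list):
--     # O(n+m): per-word stacks of refer ids; pop the largest-index occurrence per hypo word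
--     stacks = {}
--     for rid, w in refer_list:
--         stacks.setdefault(w, []).append(rid)
--     used = {}
--     word_match = []
--     kept_rev = []
--     for hid, w in reversed(hypo_list):
--         s = stacks.get(w)
--         if s:
--             word_match.append((hid, s.pop()))
--             used[w] = used.get(w, 0) + 1
--         else:
--             kept_rev.append((hid, w))
--     new_refer_rev = []
--     for rid, w in reversed(refer_list):
--         c = used.get(w, 0)
--         if c:
--             used[w] = c - 1
--         else:
--             new_refer_rev.append((rid, w))
--     hypo_list[:] = kept_rev[::-1]
--     refer_list[:] = new_refer_rev[::-1]
--     return word_match, hypo_list, refer_list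
-- ===== Notes on version B (the rewrite author's own statement) =====
-- stated objective: faster
-- what changed: Replaced A's nested index scans with repeated pops (rescanning refer_list for every hypo word) by a one-pass hash index: per-word stacks of refer ids built once, each hypo word pops the largest available occurrence in O(1), and the remaining refer list is rebuilt in one reverse pass using per-word match counters.
import Mathlib
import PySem

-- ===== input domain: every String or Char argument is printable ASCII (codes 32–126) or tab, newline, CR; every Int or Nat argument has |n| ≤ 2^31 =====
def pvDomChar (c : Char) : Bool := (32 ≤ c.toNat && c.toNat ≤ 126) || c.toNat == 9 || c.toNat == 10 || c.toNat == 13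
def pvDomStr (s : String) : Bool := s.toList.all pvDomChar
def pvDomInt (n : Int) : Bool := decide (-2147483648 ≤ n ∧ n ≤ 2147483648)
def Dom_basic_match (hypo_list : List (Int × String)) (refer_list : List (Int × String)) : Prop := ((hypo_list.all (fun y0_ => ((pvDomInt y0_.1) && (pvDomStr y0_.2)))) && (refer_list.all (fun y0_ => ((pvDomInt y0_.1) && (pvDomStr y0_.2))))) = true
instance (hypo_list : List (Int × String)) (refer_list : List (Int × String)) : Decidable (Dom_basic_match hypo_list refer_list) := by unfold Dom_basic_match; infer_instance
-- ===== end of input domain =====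

-- B replaces A's nested rescans of refer_list by a per-word hash index built once (O(n+m));
-- both A and B mutate their list arguments in place in Python, and the equivalence proved
-- here is about the returned triple (which aliases those lists).

-- ===== PORT A =====
-- default used by getD reads; every index A reads is in range (Python never raises here),
-- so List.getD / List.eraseIdx render hypo_list[i] / refer_list[j] / pop exactly.
def pvD0 : Int × String := (0, "")

-- inner 'for j in range(len(refer_list))[::-1]: if … : …; break' — returns the j it breaks at
def bmInner (w : String) (r : List (Int × String)) : List Nat → Option Nat
  | [] => none
  | j :: js => if (r.getD j pvD0).2 == w then some j else bmInner w r js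

-- outer 'for i in range(len(hypo_list))[::-1]' with the in-place pops
def bmOuter : List Nat → List (Int × String) → List (Int × String) → List (Int × Int) →
    (List (Int × Int)) × (List (Int × String)) × (List (Int × String))
  | [], h, r, wm => (wm, h, r)
  | i :: is, h, r, wm =>
    match bmInner ((h.getD i pvD0).2) r (List.range r.length).reverse with
    | some j => bmOuter is (h.eraseIdx i) (r.eraseIdx j)
        (wm ++ [((h.getD i pvD0).1, (r.getD j pvD0).1)])
    | none => bmOuter is h r wm

def basic_match (hypo_list : List (Int × String)) (refer_list : List (Int × String)) : (List (Int × Int)) × (List (Int × String)) × (List (Int × String)) :=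
  bmOuter (List.range hypo_list.length).reverse hypo_list refer_list []

-- ===== PORT B =====
-- stacks.setdefault(w, []).append(rid) over refer_list
def bmStacks : List (Int × String) → PySem.Dict String (List Int) → PySem.Dict String (List Int)
  | [], d => d
  | (rid, w) :: t, d => bmStacks t (d.insert w (d.getD w [] ++ [rid]))

-- main loop over reversed(hypo_list): pop a refer id from the word's stack, count it in 'used'
def bmLoop : List (Int × String) → PySem.Dict String (List Int) → PySem.Dict String Int →
    List (Int × Int) → List (Int × String) →
    (List (Int × Int)) × (List (Int × String)) × PySem.Dict String Int
  | [], _, used, wm, kept => (wm, kept, used)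
  | (hid, w) :: t, stks, used, wm, kept =>
    let s := stks.getD w []
    match s.getLast? with                       -- 'if s: … s.pop()'
    | some rid => bmLoop t (stks.insert w s.dropLast)
        (used.insert w (used.getD w 0 + 1)) (wm ++ [(hid, rid)]) kept
    | none => bmLoop t stks used wm (kept ++ [(hid, w)])

-- rebuild pass over reversed(refer_list), skipping used[w] occurrences per word
def bmRefer : List (Int × String) → PySem.Dict String Int → List (Int × String) → List (Int × String)
  | [], _, acc => acc
  | (rid, w) :: t, used, acc =>
    let c := used.getD w 0
    if c ≠ 0 then bmRefer t (used.insert w (c - 1)) acc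
    else bmRefer t used (acc ++ [(rid, w)])

def basic_match_alt (hypo_list : List (Int × String)) (refer_list : List (Int × String)) : (List (Int × Int)) × (List (Int × String)) × (List (Int × String)) :=
  let stks := bmStacks refer_list PySem.Dict.empty
  let res := bmLoop hypo_list.reverse stks PySem.Dict.empty [] []
  (res.1, res.2.1.reverse, (bmRefer refer_list.reverse res.2.2 []).reverse)

-- ===== PRECONDITION & SPEC =====
def Spec_basic_match (hypo_list : List (Int × String)) (refer_list : List (Int × String)) (out : (List (Int × Int)) × (List (Int × String)) × (List (Int × String))) : Prop := out = basic_match_alt hypo_list refer_list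
instance (hypo_list : List (Int × String)) (refer_list : List (Int × String)) (out : (List (Int × Int)) × (List (Int × String)) × (List (Int × String))) : Decidable (Spec_basic_match hypo_list refer_list out) := by unfold Spec_basic_match; infer_instance

-- ===== CLAIM (what is proved, stated in full; the proofs are below) =====
def Claim_equal_basic_match : Prop := ∀ (hypo_list : List (Int × String)) (refer_list : List (Int × String)), Dom_basic_match hypo_list refer_list → Spec_basic_match hypo_list refer_list (basic_match hypo_list refer_list)

-- ===== LEMMAS AND PROOFS =====

-- Common reference semantics: process hypo back to front against the reversed refer list,
-- removing the FIRST matching element of the reversed refer list (= last of refer) each time.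
def rmF (w : String) : List (Int × String) → Option (Int × List (Int × String))
  | [] => none
  | p :: t => if p.2 = w then some (p.1, t) else (rmF w t).map (fun x => (x.1, p :: x.2))

def coreR : List (Int × String) → List (Int × String) →
    (List (Int × Int)) × (List (Int × String)) × (List (Int × String))
  | [], rr => ([], [], rr)
  | (hid, w) :: t, rr =>
    match rmF w rr with
    | some x => let res := coreR t x.2; ((hid, x.1) :: res.1, res.2.1, res.2.2)
    | none => let res := coreR t rr; (res.1, (hid, w) :: res.2.1, res.2.2)

-- ---------- A side ----------
def lastIdx? (w : String) : List (Int × String) → Option Nat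
  | [] => none
  | p :: t =>
    match lastIdx? w t with
    | some j => some (j + 1)
    | none => if p.2 = w then some 0 else none

theorem bmInner_append (w : String) (r : List (Int × String)) (js₁ js₂ : List Nat) :
    bmInner w r (js₁ ++ js₂) = (bmInner w r js₁).orElse (fun _ => bmInner w r js₂) := by
  induction js₁ with
  | nil => simp [bmInner, Option.orElse]
  | cons j js ih =>
    simp only [List.cons_append, bmInner]
    split <;> simp [Option.orElse, ih]

theorem bmInner_shift (w : String) (p : Int × String) (t : List (Int × String)) (js : List Nat) :
    bmInner w (p :: t) (js.map (· + 1)) = (bmInner w t js).map (· + 1) := by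
  induction js with
  | nil => simp [bmInner]
  | cons j js ih =>
    simp only [List.map_cons, bmInner, List.getD_cons_succ]
    split <;> simp [ih]

theorem range_reverse_succ (n : Nat) :
    (List.range (n + 1)).reverse = ((List.range n).reverse.map (· + 1)) ++ [0] := by
  rw [List.range_succ_eq_map]
  simp

theorem bmInner_eq_lastIdx (w : String) (r : List (Int × String)) :
    bmInner w r (List.range r.length).reverse = lastIdx? w r := by
  induction r with
  | nil => simp [bmInner, lastIdx?]
  | cons p t ih =>
    rw [List.length_cons, range_reverse_succ, bmInner_append, bmInner_shift, ih]
    cases h : lastIdx? w t with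
    | some j => simp [lastIdx?, h, Option.orElse]
    | none =>
      simp only [lastIdx?, h]
      by_cases hw : p.2 = w <;> simp [bmInner, Option.orElse, hw]

theorem rmF_append (w : String) (xs ys : List (Int × String)) :
    rmF w (xs ++ ys) =
      match rmF w xs with
      | some x => some (x.1, x.2 ++ ys)
      | none => (rmF w ys).map (fun y => (y.1, xs ++ y.2)) := by
  induction xs with
  | nil => cases h : rmF w ys <;> simp [rmF, h]
  | cons p t ih =>
    simp only [List.cons_append, rmF]
    split
    · rfl
    · rw [ih]
      cases h : rmF w t with
      | some x => simp
      | none => cases h2 : rmF w ys <;> simp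

theorem rmF_reverse (w : String) (r : List (Int × String)) :
    rmF w r.reverse = (lastIdx? w r).map (fun j => ((r.getD j pvD0).1, (r.eraseIdx j).reverse)) := by
  induction r with
  | nil => simp [rmF, lastIdx?]
  | cons p t ih =>
    rw [List.reverse_cons, rmF_append, ih]
    cases h : lastIdx? w t with
    | some j => simp [lastIdx?, h, List.eraseIdx_cons_succ]
    | none =>
      simp only [lastIdx?, h, Option.map_none]
      by_cases hw : p.2 = w
      · simp [rmF, hw]
      · simp [rmF, hw]

theorem getD_append_len {α : Type} (xs : List α) (y : α) (zs : List α) (d : α) :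
    (xs ++ y :: zs).getD xs.length d = y := by
  induction xs with
  | nil => simp
  | cons a t ih => simpa using ih

theorem eraseIdx_append_len {α : Type} (xs : List α) (y : α) (zs : List α) :
    (xs ++ y :: zs).eraseIdx xs.length = xs ++ zs := by
  induction xs with
  | nil => simp
  | cons a t ih => simpa using ih

theorem range_reverse_cons (n : Nat) :
    (List.range (n + 1)).reverse = n :: (List.range n).reverse := by
  simp [List.range_succ]

theorem bmOuter_spec (T : List (Int × String)) : ∀ (K r : List (Int × String)) (wm : List (Int × Int)),
    bmOuter (List.range T.length).reverse (T ++ K) r wm =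
      (wm ++ (coreR T.reverse r.reverse).1,
       (coreR T.reverse r.reverse).2.1.reverse ++ K,
       (coreR T.reverse r.reverse).2.2.reverse) := by
  induction T using List.reverseRecOn with
  | nil => intro K r wm; simp [bmOuter, coreR]
  | append_singleton T' h ih =>
    intro K r wm
    have hlen : (T' ++ [h]).length = T'.length + 1 := by simp
    rw [hlen, range_reverse_cons]
    have hassoc : T' ++ [h] ++ K = T' ++ h :: K := by simp
    rw [hassoc]
    have hrev : (T' ++ [h]).reverse = h :: T'.reverse := by simp
    rw [hrev]
    cases hl : lastIdx? h.2 r with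
    | some j =>
      have hrm : rmF h.2 r.reverse = some ((r.getD j pvD0).1, (r.eraseIdx j).reverse) := by
        rw [rmF_reverse, hl]; rfl
      simp only [bmOuter, getD_append_len, bmInner_eq_lastIdx, hl]
      rw [eraseIdx_append_len, ih K (r.eraseIdx j) (wm ++ [(h.1, (r.getD j pvD0).1)])]
      simp [coreR, hrm]
    | none =>
      have hrm : rmF h.2 r.reverse = none := by rw [rmF_reverse, hl]; rfl
      simp only [bmOuter, getD_append_len, bmInner_eq_lastIdx, hl]
      rw [ih (h :: K) r wm]
      simp [coreR, hrm]

theorem basic_match_eq_core (h r : List (Int × String)) :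
    basic_match h r = ((coreR h.reverse r.reverse).1,
      (coreR h.reverse r.reverse).2.1.reverse, (coreR h.reverse r.reverse).2.2.reverse) := by
  have := bmOuter_spec h [] r []
  simpa [basic_match] using this

-- ---------- B side ----------
def updF (f : String → Int) (w : String) (v : Int) : String → Int := fun x => if x = w then v else f x

def skipF : (String → Int) → List (Int × String) → List (Int × String)
  | _, [] => []
  | f, p :: t => if f p.2 ≠ 0 then skipF (updF f p.2 (f p.2 - 1)) t else p :: skipF f t

theorem skipF_zero (l : List (Int × String)) : skipF (fun _ => 0) l = l := by
  induction l with
  | nil => rfl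
  | cons p t ih => simp [skipF, updF, ih]

theorem rmF_none_iff (w : String) (rr : List (Int × String)) :
    rmF w rr = none ↔ rr.filter (fun p => p.2 == w) = [] := by
  induction rr with
  | nil => simp [rmF]
  | cons p t ih =>
    by_cases hw : p.2 = w
    · simp [rmF, hw, List.filter_cons]
    · simp [rmF, hw, List.filter_cons, ih]

theorem rmF_some_decomp (w : String) (rr : List (Int × String)) : ∀ (rid : Int) (rr' : List (Int × String)),
    rmF w rr = some (rid, rr') →
    ∃ pre p post, rr = pre ++ p :: post ∧ rr' = pre ++ post ∧ p.2 = w ∧ p.1 = rid ∧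
      ∀ q ∈ pre, q.2 ≠ w := by
  induction rr with
  | nil => intro rid rr' h; simp [rmF] at h
  | cons p t ih =>
    intro rid rr' h
    by_cases hw : p.2 = w
    · rw [rmF, if_pos hw] at h
      simp only [Option.some.injEq, Prod.mk.injEq] at h
      exact ⟨[], p, t, by simp, by simp [← h.2], hw, h.1, by simp⟩
    · rw [rmF, if_neg hw] at h
      cases ht : rmF w t with
      | none => rw [ht] at h; simp at h
      | some x =>
        obtain ⟨xr, xl⟩ := x
        rw [ht] at h
        simp only [Option.map_some, Option.some.injEq, Prod.mk.injEq] at h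
        obtain ⟨h1, h2⟩ := h
        obtain ⟨pre, q, post, e1, e2, e3, e4, e5⟩ := ih xr xl ht
        refine ⟨p :: pre, q, post, by rw [e1]; rfl, by rw [← h2, e2]; rfl, e3, by rw [e4, h1], ?_⟩
        intro q' hq'
        rcases List.mem_cons.mp hq' with rfl | hq2
        · exact hw
        · exact e5 q' hq2

theorem skip_incr (RR : List (Int × String)) : ∀ (f : String → Int), (∀ x, 0 ≤ f x) →
    ∀ (w : String) (rid : Int) (rr' : List (Int × String)),
    rmF w (skipF f RR) = some (rid, rr') → skipF (updF f w (f w + 1)) RR = rr' := by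
  induction RR with
  | nil => intro f _ w rid rr' h; simp [skipF, rmF] at h
  | cons p t ih =>
    intro f hf w rid rr' h
    by_cases hp0 : f p.2 = 0
    · rw [skipF, if_neg (by simp [hp0])] at h
      by_cases hw : p.2 = w
      · subst hw
        rw [rmF, if_pos rfl] at h
        simp only [Option.some.injEq, Prod.mk.injEq] at h
        rw [skipF, if_pos (by simp [updF, hp0])]
        have e : updF (updF f p.2 (f p.2 + 1)) p.2 (updF f p.2 (f p.2 + 1) p.2 - 1) = f := by
          funext x
          by_cases hx : x = p.2 <;> simp [updF, hx] <;> omega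
        rw [e]
        exact h.2
      · rw [rmF, if_neg hw] at h
        cases ht : rmF w (skipF f t) with
        | none => rw [ht] at h; simp at h
        | some x =>
          obtain ⟨xr, xl⟩ := x
          rw [ht] at h
          simp only [Option.map_some, Option.some.injEq, Prod.mk.injEq] at h
          rw [skipF, if_neg (by simp [updF, fun hc : p.2 = w => hw hc, hp0])]
          rw [ih f hf w xr xl ht]
          exact h.2
    · rw [skipF, if_pos hp0] at h
      have hf' : ∀ x, 0 ≤ updF f p.2 (f p.2 - 1) x := by
        intro x
        by_cases hx : x = p.2 <;> simp [updF, hx]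
        · have := hf p.2; omega
        · exact hf x
      have ih' := ih (updF f p.2 (f p.2 - 1)) hf' w rid rr' h
      by_cases hw : p.2 = w
      · subst hw
        rw [skipF, if_pos (by simp [updF]; have := hf p.2; omega)]
        have e : updF (updF f p.2 (f p.2 + 1)) p.2 (updF f p.2 (f p.2 + 1) p.2 - 1)
            = updF (updF f p.2 (f p.2 - 1)) p.2 (updF f p.2 (f p.2 - 1) p.2 + 1) := by
          funext x
          by_cases hx : x = p.2 <;> simp [updF, hx] <;> omega
        rw [e]; exact ih'
      · rw [skipF, if_pos (by simp [updF, fun hc : p.2 = w => hw hc, hp0])]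
        have e : updF (updF f w (f w + 1)) p.2 (updF f w (f w + 1) p.2 - 1)
            = updF (updF f p.2 (f p.2 - 1)) w (updF f p.2 (f p.2 - 1) w + 1) := by
          funext x
          by_cases hx : x = p.2 <;> by_cases hxw : x = w
          · exact absurd (hx.symm.trans hxw) hw
          · subst hx; simp [updF, hw]
          · subst hxw; simp [updF, hx, hw]
          · simp [updF, hx, hxw]
        rw [e]; exact ih'

theorem bmStacks_getD (rs : List (Int × String)) : ∀ (d : PySem.Dict String (List Int)) (w : String),
    (bmStacks rs d).getD w [] = d.getD w [] ++ ((rs.filter (fun p => p.2 == w)).map Prod.fst) := by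
  induction rs with
  | nil => intro d w; simp [bmStacks]
  | cons p t ih =>
    intro d w
    obtain ⟨rid, w'⟩ := p
    rw [bmStacks, ih, PySem.Dict.getD_insert]
    by_cases hw : w = w'
    · subst hw
      simp [List.filter_cons]
    · have hw2 : ¬ w' = w := fun hc => hw hc.symm
      simp [List.filter_cons, hw, hw2]

theorem bmLoop_spec (hs : List (Int × String)) :
    ∀ (stks : PySem.Dict String (List Int)) (used : PySem.Dict String Int)
      (wm : List (Int × Int)) (kept : List (Int × String)) (RR rr : List (Int × String)),
    (∀ x, 0 ≤ used.getD x 0) →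
    (∀ w, stks.getD w [] = ((rr.filter (fun p => p.2 == w)).map Prod.fst).reverse) →
    skipF (fun x => used.getD x 0) RR = rr →
    (bmLoop hs stks used wm kept).1 = wm ++ (coreR hs rr).1 ∧
    (bmLoop hs stks used wm kept).2.1 = kept ++ (coreR hs rr).2.1 ∧
    skipF (fun x => (bmLoop hs stks used wm kept).2.2.getD x 0) RR = (coreR hs rr).2.2 := by
  induction hs with
  | nil =>
    intro stks used wm kept RR rr _ _ hskip
    exact ⟨by simp [bmLoop, coreR], by simp [bmLoop, coreR], by simpa [bmLoop, coreR] using hskip⟩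
  | cons hp t ih =>
    intro stks used wm kept RR rr hnn hst hskip
    obtain ⟨hid, w⟩ := hp
    cases hrm : rmF w rr with
    | none =>
      have hfil : rr.filter (fun p => p.2 == w) = [] := (rmF_none_iff w rr).mp hrm
      have hs0 : stks.getD w [] = [] := by rw [hst w, hfil]; rfl
      have := ih stks used wm (kept ++ [(hid, w)]) RR rr hnn hst hskip
      simp only [bmLoop, hs0, List.getLast?_nil]
      refine ⟨?_, ?_, ?_⟩
      · rw [this.1]; simp [coreR, hrm]
      · rw [this.2.1]; simp [coreR, hrm]
      · rw [this.2.2]; simp [coreR, hrm]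
    | some x =>
      obtain ⟨rid, rr'⟩ := x
      obtain ⟨pre, q, post, e1, e2, e3, e4, e5⟩ := rmF_some_decomp w rr rid rr' hrm
      have hfil : rr.filter (fun p => p.2 == w) = q :: post.filter (fun p => p.2 == w) := by
        rw [e1]
        rw [List.filter_append, List.filter_cons]
        have : pre.filter (fun p => p.2 == w) = [] := by
          rw [List.filter_eq_nil_iff]; intro a ha; simpa using e5 a ha
        simp [this, e3]
      have hsw : stks.getD w [] = ((post.filter (fun p => p.2 == w)).map Prod.fst).reverse ++ [q.1] := by
        rw [hst w, hfil]; simp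
      have hlast : (stks.getD w []).getLast? = some q.1 := by
        rw [hsw]; simp
      have hdrop : (stks.getD w []).dropLast = ((post.filter (fun p => p.2 == w)).map Prod.fst).reverse := by
        rw [hsw]; simp
      -- filters of rr'
      have hfil' : ∀ w', rr'.filter (fun p => p.2 == w') =
          if w' = w then post.filter (fun p => p.2 == w)
          else rr.filter (fun p => p.2 == w') := by
        intro w'
        by_cases hww : w' = w
        · subst hww
          rw [e2, List.filter_append]
          have : pre.filter (fun p => p.2 == w') = [] := by
            rw [List.filter_eq_nil_iff]; intro a ha; simpa using e5 a ha
          simp [this]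
        · rw [e2, e1, List.filter_append, List.filter_append, List.filter_cons]
          have : (q.2 == w') = false := by
            simp only [e3, beq_eq_false_iff_ne]
            exact fun hc => hww hc.symm
          have hww2 : ¬ w = w' := fun hc => hww hc.symm
          simp [this, hww, hww2]
      -- new state invariants
      set stks' := stks.insert w (stks.getD w []).dropLast with hstdef
      set used' := used.insert w (used.getD w 0 + 1) with husdef
      have hnn' : ∀ x, 0 ≤ used'.getD x 0 := by
        intro x
        rw [husdef, PySem.Dict.getD_insert]
        split
        · have := hnn w; omega
        · exact hnn x
      have hst' : ∀ w', stks'.getD w' [] = ((rr'.filter (fun p => p.2 == w')).map Prod.fst).reverse := by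
        intro w'
        rw [hstdef]
        rw [PySem.Dict.getD_insert]
        by_cases hww : w' = w
        · subst hww
          rw [if_pos rfl, hdrop, hfil' w']
          simp
        · rw [if_neg hww, hst w', hfil' w']
          simp [hww]
      have hskip' : skipF (fun x => used'.getD x 0) RR = rr' := by
        have he : (fun x => used'.getD x 0) = updF (fun x => used.getD x 0) w ((fun x => used.getD x 0) w + 1) := by
          funext x
          rw [husdef, PySem.Dict.getD_insert, updF]
        rw [he]
        exact skip_incr RR (fun x => used.getD x 0) hnn w rid rr' (by rw [hskip]; exact hrm)
      have := ih stks' used' (wm ++ [(hid, q.1)]) kept RR rr' hnn' hst' hskip'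
      simp only [bmLoop, hlast]
      refine ⟨?_, ?_, ?_⟩
      · rw [this.1]; simp [coreR, hrm, e4]
      · rw [this.2.1]; simp [coreR, hrm]
      · rw [this.2.2]; simp [coreR, hrm]

theorem bmRefer_spec (rs : List (Int × String)) :
    ∀ (used : PySem.Dict String Int) (acc : List (Int × String)),
    bmRefer rs used acc = acc ++ skipF (fun x => used.getD x 0) rs := by
  induction rs with
  | nil => intro used acc; simp [bmRefer, skipF]
  | cons p t ih =>
    intro used acc
    obtain ⟨rid, w⟩ := p
    rw [bmRefer]
    by_cases hc : used.getD w 0 ≠ 0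
    · rw [if_pos hc, ih]
      have he : (fun x => (used.insert w (used.getD w 0 - 1)).getD x 0)
          = updF (fun x => used.getD x 0) w (used.getD w 0 - 1) := by
        funext x
        rw [PySem.Dict.getD_insert, updF]
      rw [he, skipF, if_pos hc]
    · rw [if_neg hc, ih, skipF]
      rw [not_not] at hc
      simp [hc]

theorem basic_match_alt_eq_core (h r : List (Int × String)) :
    basic_match_alt h r = ((coreR h.reverse r.reverse).1,
      (coreR h.reverse r.reverse).2.1.reverse, (coreR h.reverse r.reverse).2.2.reverse) := by
  have hst : ∀ w, (bmStacks r PySem.Dict.empty).getD w [] =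
      (((r.reverse.filter (fun p => p.2 == w)).map Prod.fst)).reverse := by
    intro w
    rw [bmStacks_getD r PySem.Dict.empty w]
    simp [PySem.Dict.getD_empty, List.filter_reverse, List.map_reverse]
  have hnn : ∀ x, (0:Int) ≤ (PySem.Dict.empty : PySem.Dict String Int).getD x 0 := by
    intro x; rw [PySem.Dict.getD_empty]
  have hskip : skipF (fun x => (PySem.Dict.empty : PySem.Dict String Int).getD x 0) r.reverse = r.reverse := by
    have : (fun x => (PySem.Dict.empty : PySem.Dict String Int).getD x 0) = fun _ => (0:Int) := by
      funext x; rw [PySem.Dict.getD_empty]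
    rw [this, skipF_zero]
  obtain ⟨c1, c2, c3⟩ := bmLoop_spec h.reverse (bmStacks r PySem.Dict.empty) PySem.Dict.empty
    [] [] r.reverse r.reverse hnn hst hskip
  simp only [basic_match_alt]
  rw [c1, c2, bmRefer_spec, c3]
  simp

-- ===== VERDICT (by name: the statement is the Claim_ definition above) =====
theorem basic_match_spec : Claim_equal_basic_match := by
  intro h r _
  show basic_match h r = basic_match_alt h r
  rw [basic_match_eq_core, basic_match_alt_eq_core]
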